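-- pv_equiv track=rewrite | github.com/Eothred/lume-impact | impact/tools.py | find_property
-- ===== SOURCE A (Python) =====
-- def find_property(s, key='name', separator=':', delims=[' ', ',', ';']):
--     """
--     Find property of the form key+delim+value
--
--     Example: string = 'ax safsf name:QUAD01, ' should return 'QUAD01'
--
--     """
--     match=key+separator
--     ix = s.find(match)
--     if ix == -1:
--         return None
--
--     # Split out any other delims
--     ss = s[ix+len(match):]
--     for d in delims:
--         ss = ss.split(d)[0]
--
--     return ss
-- ===== SOURCE B (Python) =====
-- def _before_delims(ss, delims):
--     """Recursively cut ss at each delimiter's first occurrence (partition keeps the head)."""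
--     if not delims:
--         return ss
--     return _before_delims(ss.partition(delims[0])[0], delims[1:])
--
--
-- def find_property(s, key='name', separator=':', delims=[' ', ',', ';']):
--     """
--     Find property of the form key+separator+value
--
--     Example: string = 'ax safsf name:QUAD01, ' should return 'QUAD01'
--     """
--     match = key + separator
--     if match not in s:
--         return None
--     return _before_delims(s[s.index(match) + len(match):], delims)
-- ===== Notes on version B (the rewrite author's own statement) =====
-- stated objective: alternative
-- what changed: B replaces A's in-place loop that rebuilds the string via split-and-take-head with a recursive helper over the delimiter list whose step keeps the head of str.partition, so no list of pieces is ever built.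
import Mathlib
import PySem

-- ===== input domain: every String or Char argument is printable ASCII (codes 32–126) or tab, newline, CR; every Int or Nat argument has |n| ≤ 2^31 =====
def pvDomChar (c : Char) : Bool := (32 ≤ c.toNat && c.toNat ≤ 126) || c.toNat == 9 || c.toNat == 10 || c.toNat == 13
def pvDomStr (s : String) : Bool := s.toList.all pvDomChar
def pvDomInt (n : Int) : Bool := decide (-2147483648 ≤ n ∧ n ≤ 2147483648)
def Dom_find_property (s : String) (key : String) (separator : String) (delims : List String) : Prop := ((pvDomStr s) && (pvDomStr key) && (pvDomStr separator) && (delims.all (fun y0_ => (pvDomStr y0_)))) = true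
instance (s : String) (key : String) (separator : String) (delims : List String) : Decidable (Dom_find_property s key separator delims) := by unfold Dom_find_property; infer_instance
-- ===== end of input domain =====

-- B replaces A's split-list-and-take-head loop by a recursive descent over the
-- delimiter list whose step keeps the head of str.partition; same cost, no piece lists.

-- ===== PORT A =====
-- 'for d in delims: ss = ss.split(d)[0]'; split('') raises → none
def fpA_loop : List (List Char) → List Char → Option (List Char)
  | [], ss => some ss
  | d :: ds, ss =>
    match PySem.Chars.split? ss d with
    | none => none
    | some parts =>
      match PySem.List.pyGet? parts 0 with
      | none => none
      | some p => fpA_loop ds p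

def find_property (s : String) (key : String) (separator : String) (delims : List String) : Option String :=
  let m := key.toList ++ separator.toList
  let ix := PySem.Chars.find s.toList m
  if ix = -1 then none
  else
    let ss := PySem.Chars.slice s.toList (some (ix + (m.length : Int))) none
    match fpA_loop (delims.map String.toList) ss with
    | none => none
    | some r => some (String.ofList r)

-- ===== PORT B =====
-- hand port of str.partition (PySem has no partition): scan for the first
-- occurrence of sep, return (before, sep, after); (ss, '', '') if absent.
-- Exact on all inputs with sep ≠ []; the empty-sep ValueError is the 'none' of fpB_cut.
def pypartition (sep : List Char) : List Char → (List Char × List Char × List Char)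
  | [] => ([], [], [])
  | c :: rest =>
    if sep.isPrefixOf (c :: rest) then ([], sep, (c :: rest).drop sep.length)
    else
      let r := pypartition sep rest
      (c :: r.1, r.2.1, r.2.2)

-- '_before_delims': recursion over delims, keeping partition's head; partition('') raises → none
def fpB_cut : List Char → List (List Char) → Option (List Char)
  | ss, [] => some ss
  | ss, d :: ds => if d.isEmpty then none else fpB_cut (pypartition d ss).1 ds

-- 'if match not in s: return None'; s.index(match) = Chars.find (exact: match is present here)
def find_property_alt (s : String) (key : String) (separator : String) (delims : List String) : Option String :=
  let m := key.toList ++ separator.toList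
  if PySem.Chars.isIn m s.toList then
    match fpB_cut (PySem.Chars.slice s.toList (some (PySem.Chars.find s.toList m + (m.length : Int))) none) (delims.map String.toList) with
    | none => none
    | some r => some (String.ofList r)
  else none

-- ===== PRECONDITION & SPEC =====
-- Pre_ excludes exactly the inputs on which A raises ValueError: key+separator occurs in s
-- (so the truncation is reached) and delims contains an empty delimiter (str.split raises ValueError on it, as does B's str.partition).
def Pre_find_property (s : String) (key : String) (separator : String) (delims : List String) : Prop :=
  ¬ (PySem.Chars.isIn (key.toList ++ separator.toList) s.toList = true ∧ "" ∈ delims)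
instance (s : String) (key : String) (separator : String) (delims : List String) : Decidable (Pre_find_property s key separator delims) := by unfold Pre_find_property; infer_instance

def pvWitness_find_property : String × String × String × List String :=
  ("ax safsf name:QUAD01, ", "name", ":", [" ", ",", ";"])

def Spec_find_property (s : String) (key : String) (separator : String) (delims : List String) (out : Option String) : Prop := out = find_property_alt s key separator delims
instance (s : String) (key : String) (separator : String) (delims : List String) (out : Option String) : Decidable (Spec_find_property s key separator delims out) := by unfold Spec_find_property; infer_instance

-- ===== CLAIM (what is proved, stated in full; the proofs are below) =====
def Claim_equal_find_property : Prop := ∀ (s : String) (key : String) (separator : String) (delims : List String), Dom_find_property s key separator delims → Pre_find_property s key separator delims → Spec_find_property s key separator delims (find_property s key separator delims)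

-- ===== LEMMAS AND PROOFS =====

-- the longest prefix of l not containing sep, i.e. l cut at sep's first occurrence
def cutAt (sep : List Char) : List Char → List Char
  | [] => []
  | c :: rest => if sep.isPrefixOf (c :: rest) then [] else c :: cutAt sep rest

theorem splitOn_go_head (sep : List Char) (hsep : sep ≠ []) :
    ∀ fuel l cur acc, l.length < fuel →
      ∃ tail, PySem.Chars.splitOn.go sep fuel l cur acc
        = acc.reverse ++ (cur.reverse ++ cutAt sep l) :: tail := by
  intro fuel
  induction fuel with
  | zero => intro l cur acc h; omega
  | succ fuel ih =>
    intro l cur acc h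
    cases l with
    | nil =>
      refine ⟨[], ?_⟩
      simp [PySem.Chars.splitOn.go, cutAt]
    | cons c rest =>
      rw [PySem.Chars.splitOn.go]
      by_cases hp : sep.isPrefixOf (c :: rest) = true
      · simp only [hp, if_pos]
        have hlen : (List.drop sep.length (c :: rest)).length < fuel := by
          have : 1 ≤ sep.length := by
            cases sep with
            | nil => exact absurd rfl hsep
            | cons _ _ => simp
          simp only [List.length_drop, List.length_cons] at *
          omega
        obtain ⟨tail, htail⟩ := ih (List.drop sep.length (c :: rest)) [] (cur.reverse :: acc) hlen
        refine ⟨cutAt sep (List.drop sep.length (c :: rest)) :: tail, ?_⟩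
        rw [htail]
        simp [cutAt, hp]
      · simp only [hp]
        have hlen : rest.length < fuel := by simp at h; omega
        obtain ⟨tail, htail⟩ := ih rest (c :: cur) acc hlen
        refine ⟨tail, ?_⟩
        rw [if_neg (by simp [hp]), htail]
        simp [cutAt, hp]

theorem splitOn_head (sep : List Char) (hsep : sep ≠ []) (l : List Char) :
    PySem.List.pyGet? (PySem.Chars.splitOn l sep) 0 = some (cutAt sep l) := by
  unfold PySem.Chars.splitOn
  obtain ⟨tail, htail⟩ := splitOn_go_head sep hsep (l.length + 1) l [] [] (by omega)
  rw [htail]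
  simp

theorem pypartition_fst (sep : List Char) : ∀ l, (pypartition sep l).1 = cutAt sep l := by
  intro l
  induction l with
  | nil => rfl
  | cons c rest ih =>
    simp only [pypartition, cutAt]
    split
    · rfl
    · simpa using ih

theorem loop_eq : ∀ (ds : List (List Char)) (ss : List Char), [] ∉ ds →
    fpA_loop ds ss = fpB_cut ss ds := by
  intro ds
  induction ds with
  | nil => intro ss _; rfl
  | cons d ds ih =>
    intro ss hmem
    have hd : d ≠ [] := fun h => hmem (h ▸ List.mem_cons_self ..)
    have hmem' : [] ∉ ds := fun h => hmem (List.mem_cons_of_mem _ h)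
    have hsplit : PySem.Chars.split? ss d = some (PySem.Chars.splitOn ss d) := by
      simp [PySem.Chars.split?, List.isEmpty_iff, hd]
    simp only [fpA_loop, fpB_cut, hsplit, splitOn_head d hd,
      List.isEmpty_iff, if_neg hd, pypartition_fst]
    exact ih _ hmem'

theorem empty_not_mem_map (delims : List String) (h : "" ∉ delims) :
    [] ∉ delims.map String.toList := by
  intro hmem
  obtain ⟨a, ha, hla⟩ := List.mem_map.mp hmem
  apply h
  have : a = "" := by
    rw [← String.toList_inj]
    simpa using hla
  exact this ▸ ha

-- ===== VERDICT (by name: the statement is the Claim_ definition above) =====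
theorem find_property_spec : Claim_equal_find_property := by
  intro s key separator delims _ hpre
  unfold Spec_find_property find_property find_property_alt
  by_cases hix : PySem.Chars.find s.toList (key.toList ++ separator.toList) = -1
  · have hin : PySem.Chars.isIn (key.toList ++ separator.toList) s.toList = false := by
      rw [PySem.Chars.isIn_eq_false_iff]
      intro hinf
      exact (PySem.Chars.find_ne_neg_one_iff _ _).mpr hinf hix
    simp [hix, hin]
  · have hin : PySem.Chars.isIn (key.toList ++ separator.toList) s.toList = true := by
      rw [PySem.Chars.isIn_iff_infix]
      exact (PySem.Chars.find_ne_neg_one_iff _ _).mp hix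
    have hne : "" ∉ delims := fun hmem => hpre ⟨hin, hmem⟩
    simp only [hix, if_false, hin, if_pos]
    rw [loop_eq (delims.map String.toList) _ (empty_not_mem_map delims hne)]
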